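-- pv_equiv track=rewrite | github.com/nagyabi/forking_randao_manipulation | theory/method/preeval.py | calc_prefix_mapping
-- ===== SOURCE A (Python) =====
-- def calc_prefix_mapping(attack_string_mapping: dict[str, str]) -> dict[str, str]:
--     prefixes = set(
--         attack_string.split(".")[1] for attack_string in attack_string_mapping
--     )
--     prefix_to_possib: dict[str, list[str]] = {prefix: [] for prefix in prefixes}
--
--     for attack_string_from, attack_string_to in attack_string_mapping.items():
--         prefix_to_possib[attack_string_from.split(".")[1]].append(
--             attack_string_to.split(".")[1]
--         )
--
--     result: dict[str, str] = {}
--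
--     for prefix, possibs in prefix_to_possib.items():
--         if all(possibs[0] == possib for possib in possibs):
--             result[prefix] = possibs[0]
--         else:
--             result[prefix] = prefix
--     return result
-- ===== SOURCE B (Python) =====
-- def calc_prefix_mapping(attack_string_mapping: dict[str, str]) -> dict[str, str]:
--     seen: dict[str, str] = {}
--     conflict: set[str] = set()
--     for attack_string_from, attack_string_to in attack_string_mapping.items():
--         fp = attack_string_from.split(".")[1]
--         tp = attack_string_to.split(".")[1]
--         if fp not in seen:
--             seen[fp] = tp
--         elif seen[fp] != tp:
--             conflict.add(fp)
--     return {fp: (fp if fp in conflict else tp) for fp, tp in seen.items()}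
-- ===== Notes on version B (the rewrite author's own statement) =====
-- stated objective: simpler
-- what changed: B replaces A's three passes (collect the prefix set, group every target prefix into a per-prefix list, then scan each list for uniformity) by a single streaming pass that keeps only the first target per prefix and a conflict set, so no per-prefix lists and no second verification scan exist.
import Mathlib
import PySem

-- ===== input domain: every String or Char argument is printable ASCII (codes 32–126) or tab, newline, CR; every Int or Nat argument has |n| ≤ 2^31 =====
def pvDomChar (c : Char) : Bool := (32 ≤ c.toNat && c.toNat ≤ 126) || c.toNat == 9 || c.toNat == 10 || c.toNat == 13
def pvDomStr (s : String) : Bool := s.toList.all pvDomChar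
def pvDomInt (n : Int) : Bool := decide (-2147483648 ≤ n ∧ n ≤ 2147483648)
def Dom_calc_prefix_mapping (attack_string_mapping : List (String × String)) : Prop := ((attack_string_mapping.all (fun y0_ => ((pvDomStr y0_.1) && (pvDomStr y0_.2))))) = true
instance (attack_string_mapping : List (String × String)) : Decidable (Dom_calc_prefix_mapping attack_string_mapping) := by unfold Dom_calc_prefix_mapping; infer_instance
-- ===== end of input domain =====

-- B replaces A's three passes (collect prefixes, group all targets per prefix, scan each group
-- for uniformity) by one streaming pass keeping the first target per prefix plus a conflict set;
-- objective: simpler.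

-- ===== PORT A =====
-- s.split(".")[1]; total via getD: Pre_ guarantees '.' occurs, so the index never misses
def pvPrefix (s : String) : String :=
  (PySem.List.pyGet? ((PySem.Str.split? s ".").getD []) 1).getD ""

def calc_prefix_mapping (attack_string_mapping : List (String × String)) : List (String × String) :=
  let prefixes : PySem.Set String :=
    PySem.Set.ofList (attack_string_mapping.map (fun q => pvPrefix q.1))
  let ptp0 : PySem.Dict String (List String) :=
    prefixes.foldl (fun d pre => d.insert pre []) (PySem.Dict.mk [])
  -- Python appends to ptp[key]; the key is always present (it came from the same key set),
  -- so modify with default [] is exact here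
  let ptp : PySem.Dict String (List String) :=
    attack_string_mapping.foldl
      (fun d q => d.modify (pvPrefix q.1) [] (fun l => l ++ [pvPrefix q.2])) ptp0
  let result : PySem.Dict String String :=
    ptp.items.foldl
      (fun res pr =>
        let possib0 := (PySem.List.pyGet? pr.2 0).getD ""
        if pr.2.all (fun possib => possib0 == possib) then res.insert pr.1 possib0
        else res.insert pr.1 pr.1)
      (PySem.Dict.mk [])
  result.items

-- ===== PORT B =====
-- loop body of Source B's single pass: state = (seen, conflict)
def pvStepB (st : PySem.Dict String String × PySem.Set String) (q : String × String) :
    PySem.Dict String String × PySem.Set String :=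
  let fp := pvPrefix q.1
  let tp := pvPrefix q.2
  match st.1.get? fp with
  | none => (st.1.insert fp tp, st.2)
  | some t => if t == tp then st else (st.1, st.2.add fp)

def calc_prefix_mapping_alt (attack_string_mapping : List (String × String)) : List (String × String) :=
  let st := attack_string_mapping.foldl pvStepB (PySem.Dict.mk [], ([] : PySem.Set String))
  st.1.items.map (fun pr => (pr.1, if st.2.contains pr.1 then pr.1 else pr.2))

-- ===== PRECONDITION & SPEC =====
-- Pre_ excludes (a) strings without a '.', on which Python A raises IndexError at split('.')[1],
-- and (b) association lists with duplicate keys, which cannot arise from A's dict argument.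
def Pre_calc_prefix_mapping (attack_string_mapping : List (String × String)) : Prop :=
  (attack_string_mapping.map Prod.fst).Nodup ∧
  ∀ q ∈ attack_string_mapping, PySem.Str.isIn "." q.1 = true ∧ PySem.Str.isIn "." q.2 = true
instance (attack_string_mapping : List (String × String)) : Decidable (Pre_calc_prefix_mapping attack_string_mapping) := by unfold Pre_calc_prefix_mapping; infer_instance

def pvWitness_calc_prefix_mapping : (List (String × String)) :=
  [("a.x.1", "c.x.2"), ("b.y.1", "d.y.2")]

def Spec_calc_prefix_mapping (attack_string_mapping : List (String × String)) (out : List (String × String)) : Prop := out = calc_prefix_mapping_alt attack_string_mapping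
instance (attack_string_mapping : List (String × String)) (out : List (String × String)) : Decidable (Spec_calc_prefix_mapping attack_string_mapping out) := by unfold Spec_calc_prefix_mapping; infer_instance

-- ===== CLAIM (what is proved, stated in full; the proofs are below) =====
def Claim_equal_calc_prefix_mapping : Prop := ∀ (attack_string_mapping : List (String × String)), Dom_calc_prefix_mapping attack_string_mapping → Pre_calc_prefix_mapping attack_string_mapping → Spec_calc_prefix_mapping attack_string_mapping (calc_prefix_mapping attack_string_mapping)

-- ===== LEMMAS AND PROOFS =====

-- the targets recorded for one prefix, in list order
def pvVals (asm : List (String × String)) (p : String) : List String :=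
  (asm.filter (fun q => pvPrefix q.1 == p)).map (fun q => pvPrefix q.2)

-- the canonical result both ports compute
def pvCanon (asm : List (String × String)) : List (String × String) :=
  (PySem.Set.ofList (asm.map (fun q => pvPrefix q.1))).map
    (fun p => (p, if (pvVals asm p).all (fun v => (pvVals asm p).headD "" == v)
                  then (pvVals asm p).headD "" else p))

lemma pvHead0 (l : List String) : (PySem.List.pyGet? l 0).getD "" = l.headD "" := by
  cases l <;> simp [PySem.List.pyGet?, PySem.List.pyIdx?]

lemma pvUpdateSelf (s : PySem.Set String) (xs : List String) (h : ∀ x ∈ xs, x ∈ s) :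
    PySem.Set.update s xs = s := by
  induction xs generalizing s with
  | nil => rfl
  | cons a t ih =>
    have ha : s.contains a = true := by
      simp [PySem.Set.contains]
      exact h a (by simp)
    show PySem.Set.update (s.add a) t = s
    rw [PySem.Set.add, if_pos ha]
    exact ih s (fun x hx => h x (by simp [hx]))

lemma pvBeqDec (x y : String) : (x == y) = decide (x = y) := by
  by_cases h : x = y <;> simp [h]

lemma pvFind?Beq (l : List String) (fp : String) (h : fp ∈ l) :
    List.find? (fun x => x == fp) l = some fp := by
  induction l with
  | nil => cases h
  | cons a t ih =>
    by_cases ha : a = fp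
    · subst ha; simp
    · rw [List.find?_cons_of_neg (by simpa using ha)]
      exact ih (by rcases List.mem_cons.1 h with h1 | h1; exact absurd h1.symm ha; exact h1)

lemma pvContainsAdd (s : PySem.Set String) (x y : String) :
    (s.add x).contains y = (s.contains y || (x == y)) := by
  rw [PySem.Set.add]
  by_cases hxy : x = y
  · subst hxy
    split
    · rename_i hc
      have hx : x ∈ s := by simpa [PySem.Set.contains] using hc
      simp [PySem.Set.contains, hx]
    · simp [PySem.Set.contains]
  · split
    · simp [pvBeqDec, hxy]
    · simp [PySem.Set.contains, pvBeqDec, eq_comm, hxy]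

lemma pvHeadDAppend (l1 l2 : List String) (d : String) (h : l1 ≠ []) :
    (l1 ++ l2).headD d = l1.headD d := by
  cases l1 with
  | nil => exact absurd rfl h
  | cons a t => rfl

lemma pvGet?Map (d : PySem.Dict String String) (P : List String) (hd : String → String)
    (h : d.items = P.map (fun p => (p, hd p))) (c : String) :
    d.get? c = if c ∈ P then some (hd c) else none := by
  simp only [PySem.Dict.get?, h, List.find?_map]
  by_cases hc : c ∈ P
  · rw [show ((fun p => p.1 == c) ∘ fun p => (p, hd p)) = fun x => x == c from rfl,
       pvFind?Beq P c hc]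
    simp [hc]
  · rw [List.find?_eq_none.2 (by intro x hx; simp; intro hxc; exact hc (hxc ▸ hx))]
    simp [hc]

lemma pvValsAppend (l : List (String × String)) (q : String × String) (p : String) :
    pvVals (l ++ [q]) p
      = pvVals l p ++ (if pvPrefix q.1 == p then [pvPrefix q.2] else []) := by
  by_cases h : pvPrefix q.1 == p <;> simp [pvVals, List.filter_append, h]

lemma pvValsNil (l : List (String × String)) (p : String)
    (h : p ∉ l.map (fun q => pvPrefix q.1)) : pvVals l p = [] := by
  rw [pvVals, List.map_eq_nil_iff, List.filter_eq_nil_iff]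
  intro q hq hbeq
  exact h (List.mem_map.2 ⟨q, hq, by simpa [pvBeqDec] using hbeq⟩)

lemma pvValsNe (l : List (String × String)) (p : String)
    (h : p ∈ l.map (fun q => pvPrefix q.1)) : pvVals l p ≠ [] := by
  obtain ⟨q, hq, rfl⟩ := List.mem_map.1 h
  rw [pvVals, Ne, List.map_eq_nil_iff, List.filter_eq_nil_iff]
  intro hc
  exact hc q hq (by simp)

lemma pvA_canon (asm : List (String × String)) : calc_prefix_mapping asm = pvCanon asm := by
  set K := asm.map (fun q => pvPrefix q.1) with hK
  set P := PySem.Set.ofList K with hP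
  have hnodupP : P.Nodup := PySem.Set.nodup_ofList K
  have h0 : (P.foldl (fun d pre => d.insert pre ([] : List String)) (PySem.Dict.mk [])).items
      = P.map (fun p => (p, ([] : List String))) := by
    have := PySem.Dict.items_foldl_insert_fresh P id (fun _ => ([] : List String)) (PySem.Dict.mk [])
      (by intro a _; simp [PySem.Dict.contains]) (by simpa using hnodupP)
    simpa using this
  set ptp0 := P.foldl (fun d pre => d.insert pre ([] : List String)) (PySem.Dict.mk []) with hptp0
  have h0k : ptp0.keys = P := by
    simp [PySem.Dict.keys, h0, Function.comp_def]
  have h0g : ∀ c, ptp0.getD c [] = [] := by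
    intro c
    simp only [PySem.Dict.getD, PySem.Dict.get?, h0, List.find?_map]
    cases List.find? ((fun p => p.1 == c) ∘ fun p => (p, ([] : List String))) P <;> simp
  set F := fun (d : PySem.Dict String (List String)) (q : String × String) =>
      d.modify (pvPrefix q.1) [] (fun l => l ++ [pvPrefix q.2]) with hF
  have hkeys : (asm.foldl F ptp0).keys = P := by
    rw [hF]
    rw [PySem.Dict.keys_foldl_modify_key asm (fun q => pvPrefix q.1) [] (fun _ q => fun l => l ++ [pvPrefix q.2]) ptp0]
    rw [h0k, ← hK]
    exact pvUpdateSelf P K (fun x hx => (PySem.Set.mem_ofList K x).2 hx)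
  have hnodup : (asm.foldl F ptp0).keys.Nodup := by
    rw [hkeys]; exact hnodupP
  have hgd : ∀ c, (asm.foldl F ptp0).getD c [] = pvVals asm c := by
    intro c
    have hfm : asm.foldl F ptp0
        = (asm.map (fun q => (pvPrefix q.1, pvPrefix q.2))).foldl
            (fun d p => d.modify p.1 [] (fun l => l ++ [p.2])) ptp0 := by
      rw [List.foldl_map]
    rw [hfm, PySem.Dict.getD_foldl_modify_append, h0g]
    simp [pvVals, List.filter_map, List.map_map, Function.comp_def]
  have hitems : (asm.foldl F ptp0).items = P.map (fun p => (p, pvVals asm p)) := by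
    rw [PySem.Dict.items_eq_map_keys _ hnodup []]
    rw [hkeys]
    exact List.map_congr_left (fun p _ => by rw [hgd])
  -- final loop
  set G := fun (res : PySem.Dict String String) (pr : String × List String) =>
      let possib0 := (PySem.List.pyGet? pr.2 0).getD ""
      if pr.2.all (fun possib => possib0 == possib) then res.insert pr.1 possib0
      else res.insert pr.1 pr.1 with hG
  have hGeq : G = fun res pr => res.insert pr.1
      (if pr.2.all (fun possib => ((PySem.List.pyGet? pr.2 0).getD "" == possib))
       then (PySem.List.pyGet? pr.2 0).getD "" else pr.1) := by
    funext res pr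
    rw [hG]
    by_cases h : pr.2.all (fun possib => ((PySem.List.pyGet? pr.2 0).getD "" == possib)) = true
    · simp only [h, if_pos]
    · simp only [eq_false_of_ne_true h]
      simp
  have hfresh : ((asm.foldl F ptp0).items.foldl G (PySem.Dict.mk [])).items
      = (asm.foldl F ptp0).items.map (fun pr => (pr.1,
          if pr.2.all (fun possib => ((PySem.List.pyGet? pr.2 0).getD "" == possib))
          then (PySem.List.pyGet? pr.2 0).getD "" else pr.1)) := by
    rw [hGeq]
    have := PySem.Dict.items_foldl_insert_fresh (asm.foldl F ptp0).items Prod.fst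
      (fun pr => if pr.2.all (fun possib => ((PySem.List.pyGet? pr.2 0).getD "" == possib))
                 then (PySem.List.pyGet? pr.2 0).getD "" else pr.1)
      (PySem.Dict.mk [])
      (by intro a _; simp [PySem.Dict.contains])
      (by show ((asm.foldl F ptp0).items.map (fun x => x.1)).Nodup; exact hnodup)
    simpa using this
  show ((asm.foldl F ptp0).items.foldl G (PySem.Dict.mk [])).items = pvCanon asm
  rw [hfresh, hitems, List.map_map, pvCanon]
  refine List.map_congr_left (fun p _ => ?_)
  simp [pvHead0]

lemma pvB_inv (asm : List (String × String)) :
    (asm.foldl pvStepB (PySem.Dict.mk [], ([] : PySem.Set String))).1.items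
      = (PySem.Set.ofList (asm.map fun q => pvPrefix q.1)).map
          (fun p => (p, (pvVals asm p).headD ""))
  ∧ ∀ p, (asm.foldl pvStepB (PySem.Dict.mk [], ([] : PySem.Set String))).2.contains p
      = !((pvVals asm p).all (fun v => (pvVals asm p).headD "" == v)) := by
  induction asm using List.reverseRecOn with
  | nil =>
    refine ⟨rfl, fun p => ?_⟩
    simp [pvVals, PySem.Set.contains]
  | append_singleton l q ih =>
    obtain ⟨ih1, ih2⟩ := ih
    set st := l.foldl pvStepB (PySem.Dict.mk [], ([] : PySem.Set String)) with hst
    set K := l.map (fun r => pvPrefix r.1) with hKdef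
    set P := PySem.Set.ofList K with hPdef
    have hget := pvGet?Map st.1 P (fun p => (pvVals l p).headD "") ih1
    have hK' : (l ++ [q]).map (fun r => pvPrefix r.1) = K ++ [pvPrefix q.1] := by
      simp [hKdef]
    have hfold : (l ++ [q]).foldl pvStepB (PySem.Dict.mk [], ([] : PySem.Set String))
        = pvStepB st q := by
      rw [List.foldl_append]; rfl
    rw [hfold, hK']
    have hP' : PySem.Set.ofList (K ++ [pvPrefix q.1]) = P.add (pvPrefix q.1) := by
      rw [hPdef, PySem.Set.ofList, PySem.Set.ofList, List.foldl_append]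
      rfl
    rw [hP']
    by_cases hmem : pvPrefix q.1 ∈ P
    · -- existing prefix
      have hne : pvVals l (pvPrefix q.1) ≠ [] :=
        pvValsNe l _ ((PySem.Set.mem_ofList K _).1 hmem)
      have hg : st.1.get? (pvPrefix q.1) = some ((pvVals l (pvPrefix q.1)).headD "") := by
        rw [hget]; simp [hmem]
      have hPadd : P.add (pvPrefix q.1) = P := by
        rw [PySem.Set.add, if_pos (by simpa [PySem.Set.contains] using hmem)]
      rw [hPadd]
      have hhd : ∀ p ∈ P, (pvVals (l ++ [q]) p).headD "" = (pvVals l p).headD "" := by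
        intro p hp
        rw [pvValsAppend]
        by_cases hb : pvPrefix q.1 == p
        · have : p = pvPrefix q.1 := by simpa [pvBeqDec, eq_comm] using hb
          subst this
          rw [if_pos hb, pvHeadDAppend _ _ _ hne]
        · rw [if_neg (by simpa using hb), List.append_nil]
      have hitems' : (pvStepB st q).1.items
          = P.map (fun p => (p, (pvVals (l ++ [q]) p).headD "")) ∧
          ∀ p, (pvStepB st q).2.contains p
            = !((pvVals (l ++ [q]) p).all (fun v => (pvVals (l ++ [q]) p).headD "" == v)) := by
        rw [pvStepB]
        simp only [hg]
        by_cases hb : ((pvVals l (pvPrefix q.1)).headD "" == pvPrefix q.2)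
        · rw [if_pos hb]
          constructor
          · rw [ih1]
            exact (List.map_congr_left (fun p hp => by rw [hhd p hp])).symm
          · intro p
            rw [ih2 p]
            by_cases hbp : pvPrefix q.1 == p
            · have hpq : p = pvPrefix q.1 := by simpa [pvBeqDec, eq_comm] using hbp
              subst hpq
              rw [pvValsAppend, if_pos hbp, pvHeadDAppend _ _ _ hne, List.all_append]
              simp only [List.all_cons, List.all_nil, hb, Bool.and_true]
            · rw [pvValsAppend, if_neg (by simpa using hbp), List.append_nil]
        · rw [if_neg hb]
          constructor
          · rw [ih1]
            exact (List.map_congr_left (fun p hp => by rw [hhd p hp])).symm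
          · intro p
            rw [pvContainsAdd, ih2 p]
            by_cases hbp : pvPrefix q.1 == p
            · have hpq : p = pvPrefix q.1 := by simpa [pvBeqDec, eq_comm] using hbp
              subst hpq
              rw [pvValsAppend, if_pos hbp, pvHeadDAppend _ _ _ hne, List.all_append]
              simp only [List.all_cons, List.all_nil, Bool.and_true, hbp,
                eq_false_of_ne_true hb, Bool.and_false, Bool.not_false, Bool.or_true]
            · rw [pvValsAppend, if_neg (by simpa using hbp), List.append_nil]
              simp [eq_false_of_ne_true hbp]
      exact hitems'
    · -- fresh prefix
      have hvq : pvVals l (pvPrefix q.1) = [] :=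
        pvValsNil l _ (fun hc => hmem ((PySem.Set.mem_ofList K _).2 hc))
      have hg : st.1.get? (pvPrefix q.1) = none := by
        rw [hget]; simp [hmem]
      have hcont : st.1.contains (pvPrefix q.1) = false := by
        simp only [PySem.Dict.contains, ih1, List.any_map, List.any_eq_false]
        intro p hp
        simp only [Function.comp_apply, pvBeqDec, decide_eq_true_eq]
        intro hpe
        exact hmem (hpe ▸ hp)
      have hPadd : P.add (pvPrefix q.1) = P ++ [pvPrefix q.1] := by
        rw [PySem.Set.add, if_neg (by simp [PySem.Set.contains, hmem])]
      have hins : (st.1.insert (pvPrefix q.1) (pvPrefix q.2)).items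
          = st.1.items ++ [(pvPrefix q.1, pvPrefix q.2)] := by
        rw [PySem.Dict.insert, if_neg (by simp [hcont])]
      constructor
      · rw [pvStepB]
        simp only [hg]
        rw [hins, hPadd, List.map_append, ih1]
        congr 1
        · exact List.map_congr_left (fun p hp => by
            rw [pvValsAppend, if_neg, List.append_nil]
            simp only [pvBeqDec, decide_eq_true_eq]
            intro hpe
            exact hmem (hpe ▸ hp))
        · rw [List.map_singleton, pvValsAppend, hvq, if_pos (by simp)]
          rfl
      · intro p
        rw [pvStepB]
        simp only [hg]
        rw [ih2 p]
        by_cases hbp : pvPrefix q.1 == p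
        · have hpq : p = pvPrefix q.1 := by simpa [pvBeqDec, eq_comm] using hbp
          subst hpq
          rw [pvValsAppend, if_pos hbp, hvq]
          simp
        · rw [pvValsAppend, if_neg (by simpa using hbp), List.append_nil]

lemma pvB_canon (asm : List (String × String)) : calc_prefix_mapping_alt asm = pvCanon asm := by
  obtain ⟨h1, h2⟩ := pvB_inv asm
  show (asm.foldl pvStepB (PySem.Dict.mk [], ([] : PySem.Set String))).1.items.map _ = _
  rw [h1, List.map_map, pvCanon]
  refine List.map_congr_left (fun p hp => ?_)
  simp only [Function.comp_apply, h2 p]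
  cases hall : (pvVals asm p).all (fun v => (pvVals asm p).headD "" == v) <;>
    simp only [Bool.not_false, Bool.not_true] <;> rfl


-- ===== VERDICT (by name: the statement is the Claim_ definition above) =====
theorem calc_prefix_mapping_spec : Claim_equal_calc_prefix_mapping := by
  intro asm _ _
  unfold Spec_calc_prefix_mapping
  rw [pvA_canon, pvB_canon]
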